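-- pv_equiv track=rewrite | github.com/pymc-devs/pymc-experimental | pymc_experimental/model/marginal/graph_analysis.py | _broadcast_dims
-- ===== SOURCE A (Python) =====
-- from collections.abc import Sequence
--
-- DIMS = tuple[int | None, ...]
--
-- def _broadcast_dims(
--     inputs_dims: Sequence[DIMS],
-- ) -> DIMS:
--     output_ndim = max((len(input_dim) for input_dim in inputs_dims), default=0)
--
--     # Add missing dims
--     inputs_dims = [
--         (None,) * (output_ndim - len(input_dim)) + input_dim for input_dim in inputs_dims
--     ]
--
--     # Find which known dims show in the output, while checking no mixing
--     output_dims = []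
--     for inputs_dim in zip(*inputs_dims):
--         output_dim = None
--         for input_dim in inputs_dim:
--             if input_dim is None:
--                 continue
--             if output_dim is not None and output_dim != input_dim:
--                 raise ValueError("Different known dimensions mixed via broadcasting")
--             output_dim = input_dim
--         output_dims.append(output_dim)
--
--     # Check for duplicates
--     known_dims = [dim for dim in output_dims if dim is not None]
--     if len(known_dims) > len(set(known_dims)):
--         raise ValueError("Same known dimension used in different axis after broadcasting")
--
--     return tuple(output_dims)
-- ===== SOURCE B (Python) =====
-- def _broadcast_dims(inputs_dims):
--     output_ndim = 0
--     for input_dim in inputs_dims: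
--         if len(input_dim) > output_ndim:
--             output_ndim = len(input_dim)
--
--     # Right-aligned direct accumulation: no padding, no transpose
--     output_dims = [None] * output_ndim
--     for input_dim in inputs_dims:
--         offset = output_ndim - len(input_dim)
--         for i, v in enumerate(input_dim):
--             if v is None:
--                 continue
--             cur = output_dims[offset + i]
--             if cur is not None and cur != v:
--                 raise ValueError("Different known dimensions mixed via broadcasting")
--             output_dims[offset + i] = v
--
--     known_dims = [dim for dim in output_dims if dim is not None]
--     if len(known_dims) > len(set(known_dims)):
--         raise ValueError("Same known dimension used in different axis after broadcasting")
--
--     return tuple(output_dims)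
-- ===== Notes on version B (the rewrite author's own statement) =====
-- stated objective: alternative
-- what changed: B drops A's left-padding comprehension and zip(*) transpose: it preallocates a [None]*output_ndim result and writes each input's entries directly at their right-aligned axis (output_ndim - len + i), checking mixing on the spot; the duplicate check is unchanged.
import Mathlib
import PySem

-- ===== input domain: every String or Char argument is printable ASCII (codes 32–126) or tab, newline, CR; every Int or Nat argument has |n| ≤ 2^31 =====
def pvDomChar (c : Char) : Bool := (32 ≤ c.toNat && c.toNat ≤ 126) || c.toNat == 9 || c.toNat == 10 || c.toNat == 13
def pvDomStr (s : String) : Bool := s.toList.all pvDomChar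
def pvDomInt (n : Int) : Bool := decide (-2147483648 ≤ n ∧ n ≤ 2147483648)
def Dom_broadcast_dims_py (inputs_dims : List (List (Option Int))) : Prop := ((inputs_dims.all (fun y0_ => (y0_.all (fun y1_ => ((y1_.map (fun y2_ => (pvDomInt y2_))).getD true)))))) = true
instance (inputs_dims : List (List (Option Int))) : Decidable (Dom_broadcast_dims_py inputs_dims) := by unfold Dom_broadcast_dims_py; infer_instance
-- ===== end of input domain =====

-- B replaces A's left-padding + zip(*) transpose by a right-aligned in-place accumulation
-- into a preallocated output list (objective: alternative decomposition; neither version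
-- mutates its argument, equivalence is about the return value).

-- ===== PORT A =====
-- output_dim accumulation over one zipped column: keep the last non-None value.
-- Python raises "Different known dimensions mixed" when two differing non-None values meet
-- in a column; those inputs are outside Pre_, so the port just keeps accumulating there.
def pvStep (a v : Option Int) : Option Int :=
  match v with
  | none => a
  | some x => some x

def pvColFold (col : List (Option Int)) : Option Int :=
  col.foldl pvStep none

-- max((len(d) for d in inputs_dims), default=0)
def pvMaxLen (inputs_dims : List (List (Option Int))) : Nat :=
  inputs_dims.foldl (fun m d => max m d.length) 0

-- zip(*rows) has the length of the shortest row (0 for no rows); after A's padding all rows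
-- have equal length, so indexing columns k < pvZipLen with getD is exact for A's use.
def pvZipLen (rows : List (List (Option Int))) : Nat :=
  match rows with
  | [] => 0
  | r :: rs => rs.foldl (fun a r' => min a r'.length) r.length

def broadcast_dims_py (inputs_dims : List (List (Option Int))) : List (Option Int) :=
  let output_ndim := pvMaxLen inputs_dims
  -- inputs_dims = [(None,)*(output_ndim-len(d)) + d for d in inputs_dims]
  let padded := inputs_dims.map (fun d => List.replicate (output_ndim - d.length) none ++ d)
  -- for inputs_dim in zip(*inputs_dims): fold each column.  The final duplicate check only
  -- raises (those inputs are outside Pre_), so the returned value is tuple(output_dims).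
  (List.range (pvZipLen padded)).map (fun k => pvColFold (padded.map (fun r => r.getD k none)))

-- ===== PORT B =====
-- inner loop 'for i, v in enumerate(input_dim)': i is the running index, L = len(input_dim),
-- writes go to output index N - L + i.  Python B raises when a differing non-None value is
-- already stored (outside Pre_); the port overwrites, which coincides with Python B wherever
-- it returns.  The final duplicate check only raises, also outside Pre_.
def pvUpdAux (N L : Nat) : Nat → List (Option Int) → List (Option Int) → List (Option Int)
  | _, acc, [] => acc
  | i, acc, v :: rest =>
    pvUpdAux N L (i + 1)
      (match v with
       | none => acc
       | some x => acc.set (N - L + i) (some x)) rest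

def pvUpdRow (N : Nat) (acc d : List (Option Int)) : List (Option Int) :=
  pvUpdAux N d.length 0 acc d

-- B's explicit max loop: 'if len(input_dim) > output_ndim: output_ndim = len(input_dim)'
def pvMaxLenB (inputs_dims : List (List (Option Int))) : Nat :=
  inputs_dims.foldl (fun m d => if m < d.length then d.length else m) 0

def broadcast_dims_py_alt (inputs_dims : List (List (Option Int))) : List (Option Int) :=
  let output_ndim := pvMaxLenB inputs_dims
  inputs_dims.foldl (pvUpdRow output_ndim) (List.replicate output_ndim none)

-- ===== PRECONDITION & SPEC =====
-- Pre_ excludes exactly the inputs on which Python A raises ValueError: a right-aligned output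
-- axis receiving two different known dims (mixing), or two different axes both ending with the
-- same known dim (duplicate).  A returns normally on every other input.
def Pre_broadcast_dims_py (inputs_dims : List (List (Option Int))) : Prop :=
  ∀ d1 ∈ inputs_dims, ∀ d2 ∈ inputs_dims,
    ∀ i ∈ List.range d1.length, ∀ j ∈ List.range d2.length,
      d1.getD i none ≠ none → d2.getD j none ≠ none →
        ((pvMaxLen inputs_dims - d1.length + i = pvMaxLen inputs_dims - d2.length + j) ↔
          d1.getD i none = d2.getD j none)

instance (inputs_dims : List (List (Option Int))) : Decidable (Pre_broadcast_dims_py inputs_dims) := by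
  unfold Pre_broadcast_dims_py; infer_instance

def pvWitness_broadcast_dims_py : List (List (Option Int)) :=
  [[some 5, none], [none, some 7], [some 7]]

def Spec_broadcast_dims_py (inputs_dims : List (List (Option Int))) (out : List (Option Int)) : Prop := out = broadcast_dims_py_alt inputs_dims
instance (inputs_dims : List (List (Option Int))) (out : List (Option Int)) : Decidable (Spec_broadcast_dims_py inputs_dims out) := by unfold Spec_broadcast_dims_py; infer_instance

-- ===== CLAIM (what is proved, stated in full; the proofs are below) =====
def Claim_equal_broadcast_dims_py : Prop := ∀ (inputs_dims : List (List (Option Int))), Dom_broadcast_dims_py inputs_dims → Pre_broadcast_dims_py inputs_dims → Spec_broadcast_dims_py inputs_dims (broadcast_dims_py inputs_dims)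

-- ===== LEMMAS AND PROOFS =====
-- The two ports in fact agree on EVERY input (each ignores the raising branches, which Pre_
-- excludes): per output axis both compute the last non-None value contributed to that axis,
-- A column-wise after padding, B row-wise by overwriting.

-- the per-axis value contributed by row d at output index k (the padded view of d)
def pvPadGet (N : Nat) (d : List (Option Int)) (k : Nat) : Option Int :=
  if k < N - d.length then none else d.getD (k - (N - d.length)) none

theorem set_getD (acc : List (Option Int)) (idx k : Nat) (x : Option Int) (hk : k < acc.length) :
    (acc.set idx x).getD k none = if idx = k then x else acc.getD k none := by
  rw [List.getD_eq_getElem?_getD, List.getElem?_set, List.getD_eq_getElem?_getD]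
  split
  · next h => rw [if_pos (by omega)]; rfl
  · rfl

theorem foldl_max_le_init (l : List (List (Option Int))) : ∀ b : Nat, b ≤ l.foldl (fun m d => max m d.length) b := by
  induction l with
  | nil => simp
  | cons a t ih => intro b; exact le_trans (le_max_left b a.length) (ih _)

theorem len_le_pvMaxLen (inputs_dims : List (List (Option Int)))
    (d : List (Option Int)) (hd : d ∈ inputs_dims) :
    d.length ≤ pvMaxLen inputs_dims := by
  have : ∀ b : Nat, d.length ≤ inputs_dims.foldl (fun m d => max m d.length) b := by
    induction inputs_dims with
    | nil => cases hd
    | cons a t ih =>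
      intro b
      rcases List.mem_cons.mp hd with rfl | h
      · exact le_trans (le_max_right b d.length) (foldl_max_le_init t _)
      · exact ih h _
  exact this 0

theorem pvUpdAux_length (N L : Nat) (ds : List (Option Int)) : ∀ (i : Nat)
    (acc : List (Option Int)), (pvUpdAux N L i acc ds).length = acc.length := by
  induction ds with
  | nil => intro i acc; rfl
  | cons v rest ih => intro i acc; cases v <;> simp [pvUpdAux, ih]

theorem pvUpdAux_getD (N L : Nat) (k : Nat) :
    ∀ (ds : List (Option Int)) (i : Nat) (acc : List (Option Int)), k < acc.length →
    (pvUpdAux N L i acc ds).getD k none =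
      (if N - L + i ≤ k ∧ k < N - L + i + ds.length then
        pvStep (acc.getD k none) (ds.getD (k - (N - L + i)) none)
       else acc.getD k none) := by
  intro ds
  induction ds with
  | nil =>
    intro i acc hk
    rw [if_neg (by simp only [List.length_nil]; omega)]
    rfl
  | cons v rest ih =>
    intro i acc hk
    by_cases hkP : k = N - L + i
    · cases v with
      | none =>
        rw [show pvUpdAux N L i acc (none :: rest) = pvUpdAux N L (i+1) acc rest from rfl]
        rw [ih (i+1) acc hk]
        rw [if_neg (by omega), if_pos (by simp only [List.length_cons]; omega)]
        have h0 : k - (N - L + i) = 0 := by omega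
        rw [h0]
        rfl
      | some x =>
        rw [show pvUpdAux N L i acc (some x :: rest) = pvUpdAux N L (i+1) (acc.set (N-L+i) (some x)) rest from rfl]
        rw [ih (i+1) _ (by simpa using hk)]
        rw [set_getD _ _ _ _ hk]
        rw [if_neg (by omega), if_pos (by omega)]
        rw [if_pos (by simp only [List.length_cons]; omega)]
        have h0 : k - (N - L + i) = 0 := by omega
        rw [h0]
        rfl
    · cases v with
      | none =>
        rw [show pvUpdAux N L i acc (none :: rest) = pvUpdAux N L (i+1) acc rest from rfl]
        rw [ih (i+1) acc hk]
        by_cases hC : N - L + (i+1) ≤ k ∧ k < N - L + (i+1) + rest.length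
        · rw [if_pos hC, if_pos (by simp only [List.length_cons]; omega)]
          have hidx : k - (N - L + i) = (k - (N - L + (i+1))) + 1 := by omega
          rw [hidx, List.getD_cons_succ]
        · rw [if_neg hC, if_neg (by simp only [List.length_cons]; omega)]
      | some x =>
        rw [show pvUpdAux N L i acc (some x :: rest) = pvUpdAux N L (i+1) (acc.set (N-L+i) (some x)) rest from rfl]
        rw [ih (i+1) _ (by simpa using hk)]
        rw [set_getD _ _ _ _ hk]
        rw [if_neg (show ¬ (N - L + i = k) by omega)]
        by_cases hC : N - L + (i+1) ≤ k ∧ k < N - L + (i+1) + rest.length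
        · rw [if_pos hC, if_pos (by simp only [List.length_cons]; omega)]
          have hidx : k - (N - L + i) = (k - (N - L + (i+1))) + 1 := by omega
          rw [hidx, List.getD_cons_succ]
        · rw [if_neg hC, if_neg (by simp only [List.length_cons]; omega)]

theorem pvUpdRow_getD (N : Nat) (acc d : List (Option Int)) (k : Nat)
    (hk : k < acc.length) (hN : acc.length = N) (hd : d.length ≤ N) :
    (pvUpdRow N acc d).getD k none = pvStep (acc.getD k none) (pvPadGet N d k) := by
  rw [pvUpdRow, pvUpdAux_getD N d.length k d 0 acc hk, pvPadGet]
  by_cases h : k < N - d.length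
  · rw [if_neg (by omega), if_pos h]
    rfl
  · rw [if_pos (by omega), if_neg h]
    simp only [Nat.add_zero]

theorem pvFoldRows_getD (N : Nat) (rows : List (List (Option Int))) (k : Nat) (hk : k < N) :
    ∀ (acc : List (Option Int)), acc.length = N →
    (∀ d ∈ rows, d.length ≤ N) →
    (rows.foldl (pvUpdRow N) acc).getD k none =
      (rows.map (fun d => pvPadGet N d k)).foldl pvStep (acc.getD k none) := by
  induction rows with
  | nil => intro acc _ _; rfl
  | cons d rest ih =>
    intro acc hN hrows
    have hlen : (pvUpdRow N acc d).length = N := by rw [pvUpdRow, pvUpdAux_length]; exact hN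
    calc ((d :: rest).foldl (pvUpdRow N) acc).getD k none
        = (rest.foldl (pvUpdRow N) (pvUpdRow N acc d)).getD k none := rfl
      _ = (rest.map (fun d => pvPadGet N d k)).foldl pvStep ((pvUpdRow N acc d).getD k none) :=
          ih _ hlen (fun d' hd' => hrows d' (List.mem_cons_of_mem _ hd'))
      _ = _ := by
          rw [pvUpdRow_getD N acc d k (by omega) hN (hrows d (List.mem_cons_self))]
          rfl

theorem pvFoldRows_length (N : Nat) (rows : List (List (Option Int))) :
    ∀ (acc : List (Option Int)),
    (rows.foldl (pvUpdRow N) acc).length = acc.length := by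
  induction rows with
  | nil => intro acc; rfl
  | cons d rest ih => intro acc; rw [List.foldl_cons, ih, pvUpdRow, pvUpdAux_length]

theorem pvPadded_getD (N : Nat) (d : List (Option Int)) (k : Nat) :
    (List.replicate (N - d.length) none ++ d).getD k none = pvPadGet N d k := by
  rw [pvPadGet]
  by_cases h : k < N - d.length
  · rw [if_pos h, List.getD_append _ _ _ _ (by simpa using h)]
    exact List.getD_replicate _ h
  · rw [if_neg h, List.getD_append_right _ _ _ _ (by simp; omega)]
    simp

theorem foldl_min_const (N : Nat) (l : List (List (Option Int))) :
    (∀ x ∈ l, x.length = N) → l.foldl (fun a r' => min a r'.length) N = N := by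
  induction l with
  | nil => intro _; rfl
  | cons a t ih =>
    intro h
    rw [List.foldl_cons, h a List.mem_cons_self, min_self]
    exact ih (fun x hx => h x (List.mem_cons_of_mem _ hx))

theorem padded_length (N : Nat) (d : List (Option Int)) (hd : d.length ≤ N) :
    (List.replicate (N - d.length) none ++ d).length = N := by
  simp; omega

theorem pvMaxLenB_eq (inputs_dims : List (List (Option Int))) :
    pvMaxLenB inputs_dims = pvMaxLen inputs_dims := by
  unfold pvMaxLenB pvMaxLen
  congr 1
  funext m d
  split <;> omega

theorem ports_agree (inputs_dims : List (List (Option Int))) :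
    broadcast_dims_py inputs_dims = broadcast_dims_py_alt inputs_dims := by
  cases inputs_dims with
  | nil => rfl
  | cons r rs =>
    show _ = (r :: rs).foldl (pvUpdRow (pvMaxLenB (r :: rs))) (List.replicate (pvMaxLenB (r :: rs)) none)
    rw [pvMaxLenB_eq]
    set N := pvMaxLen (r :: rs) with hN
    have hle : ∀ d ∈ r :: rs, d.length ≤ N := fun d hd => len_le_pvMaxLen _ d hd
    have hz : pvZipLen ((r :: rs).map
        (fun d => List.replicate (N - d.length) none ++ d)) = N := by
      rw [List.map_cons, pvZipLen, padded_length N r (hle r List.mem_cons_self)]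
      exact foldl_min_const N _ (by
        intro x hx
        rcases List.mem_map.mp hx with ⟨d, hd, rfl⟩
        exact padded_length N d (hle d (List.mem_cons_of_mem _ hd)))
    show (List.range (pvZipLen ((r :: rs).map
        (fun d => List.replicate (N - d.length) none ++ d)))).map
        (fun k => pvColFold (((r :: rs).map
          (fun d => List.replicate (N - d.length) none ++ d)).map (fun row => row.getD k none))) =
      (r :: rs).foldl (pvUpdRow N) (List.replicate N none)
    rw [hz]
    apply List.ext_getElem
    · rw [List.length_map, List.length_range, pvFoldRows_length, List.length_replicate]
    · intro k h1 h2
      have hk : k < N := by simpa using h1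
      rw [List.getElem_map, List.getElem_range]
      have hB : ((r :: rs).foldl (pvUpdRow N) (List.replicate N none))[k] =
          ((r :: rs).foldl (pvUpdRow N) (List.replicate N none)).getD k none :=
        (List.getD_eq_getElem _ _ h2).symm
      rw [hB, pvFoldRows_getD N (r :: rs) k hk (List.replicate N none)
        (List.length_replicate) hle, List.getD_replicate _ hk]
      rw [pvColFold, List.map_map]
      congr 1
      apply List.map_congr_left
      intro d _
      exact pvPadded_getD N d k

-- ===== VERDICT (by name: the statement is the Claim_ definition above) =====
theorem broadcast_dims_py_spec : Claim_equal_broadcast_dims_py := by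
  intro inputs_dims _ _
  unfold Spec_broadcast_dims_py
  exact ports_agree inputs_dims
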